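-- pv_equiv track=rewrite | github.com/gmc-code/PC-Latex-Webapp | app/latex/numberlines/number_lines_maker_blank.py | generate_diagram_text_blank
-- ===== SOURCE A (Python) =====
-- def make_diagram_blank(tex_diagram_template_txt):
--     posttext = r"\vspace{1pt}"
--     return tex_diagram_template_txt + posttext
--
-- def generate_diagram_text_blank(numq, tex_diagram_template_txt):
--     diagrams_text = ""
--     # add the headtext
--     headtext = r"\pagebreak ~ \newline ~ \newline"
--     for i in range(1, numq + 1):
--         img_tex = make_diagram_blank(tex_diagram_template_txt)
--         if i > 8 and i % 8 == 1:
--             diagrams_text += headtext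
--         diagrams_text += img_tex
--     return diagrams_text
-- ===== SOURCE B (Python) =====
-- def make_diagram_blank(tex_diagram_template_txt):
--     posttext = r"\vspace{1pt}"
--     return tex_diagram_template_txt + posttext
--
-- def generate_diagram_text_blank(numq, tex_diagram_template_txt):
--     # Build the single diagram once, then emit 8-diagram page blocks:
--     # headtext before every block after the first, string multiplication
--     # inside a block; join the collected pieces at the end.
--     diagram = make_diagram_blank(tex_diagram_template_txt)
--     headtext = r"\pagebreak ~ \newline ~ \newline"
--     pieces = []
--     b = 0
--     while 8 * b < numq:
--         if b > 0:
--             pieces.append(headtext)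
--         pieces.append(diagram * min(8, numq - 8 * b))
--         b += 1
--     return "".join(pieces)
-- ===== Notes on version B (the rewrite author's own statement) =====
-- stated objective: alternative
-- what changed: Replaces the per-item loop that re-tests i%8 and re-makes the diagram on every index with a loop over 8-sized page blocks: the diagram string is built once, each block is emitted by string multiplication, and the collected pieces are joined at the end.
import Mathlib
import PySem

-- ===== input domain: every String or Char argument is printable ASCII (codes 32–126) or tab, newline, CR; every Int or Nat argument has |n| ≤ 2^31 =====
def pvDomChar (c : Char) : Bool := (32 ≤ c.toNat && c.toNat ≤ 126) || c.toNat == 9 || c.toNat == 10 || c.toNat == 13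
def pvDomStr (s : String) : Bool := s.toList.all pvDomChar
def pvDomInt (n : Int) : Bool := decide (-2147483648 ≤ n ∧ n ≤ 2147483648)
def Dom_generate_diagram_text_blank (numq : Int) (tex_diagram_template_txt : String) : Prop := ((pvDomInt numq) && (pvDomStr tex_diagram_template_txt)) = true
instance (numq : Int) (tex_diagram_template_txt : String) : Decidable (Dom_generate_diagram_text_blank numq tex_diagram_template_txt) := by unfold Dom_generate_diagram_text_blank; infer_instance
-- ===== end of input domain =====

-- B builds the diagram once and emits 8-diagram page blocks (headtext before every block
-- after the first) instead of scanning every index and testing i % 8 (objective: alternative).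

-- ===== PORT A =====
def make_diagram_blank (tex_diagram_template_txt : String) : String :=
  let posttext := "\\vspace{1pt}"
  tex_diagram_template_txt ++ posttext

def generate_diagram_text_blank (numq : Int) (tex_diagram_template_txt : String) : String :=
  let headtext := "\\pagebreak ~ \\newline ~ \\newline"
  (PySem.List.pyRange 1 (numq + 1) 1).foldl
    (fun diagrams_text i =>
      let img_tex := make_diagram_blank tex_diagram_template_txt
      let diagrams_text :=
        if i > 8 ∧ PySem.Int.mod i 8 = 1 then diagrams_text ++ headtext else diagrams_text
      diagrams_text ++ img_tex) ""

-- ===== PORT B =====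
-- exact port of Python string repetition s * n (empty for n ≤ 0)
def pvStrMulNat (s : String) : Nat → String
  | 0 => ""
  | n + 1 => s ++ pvStrMulNat s n

def pvStrMul (s : String) (n : Int) : String := pvStrMulNat s n.toNat

-- the while loop of Source B, with loop state (b, pieces)
def pvAltLoop (numq : Int) (headtext diagram : String) (b : Int) (pieces : List String) : List String :=
  if _h : 8 * b < numq then
    pvAltLoop numq headtext diagram (b + 1)
      ((if b > 0 then pieces ++ [headtext] else pieces)
        ++ [pvStrMul diagram (min 8 (numq - 8 * b))])
  else pieces
termination_by (numq - 8 * b).toNat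
decreasing_by omega

def generate_diagram_text_blank_alt (numq : Int) (tex_diagram_template_txt : String) : String :=
  let diagram := make_diagram_blank tex_diagram_template_txt
  let headtext := "\\pagebreak ~ \\newline ~ \\newline"
  PySem.Str.join "" (pvAltLoop numq headtext diagram 0 [])

-- ===== PRECONDITION & SPEC =====
def Spec_generate_diagram_text_blank (numq : Int) (tex_diagram_template_txt : String) (out : String) : Prop := out = generate_diagram_text_blank_alt numq tex_diagram_template_txt
instance (numq : Int) (tex_diagram_template_txt : String) (out : String) : Decidable (Spec_generate_diagram_text_blank numq tex_diagram_template_txt out) := by unfold Spec_generate_diagram_text_blank; infer_instance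

-- ===== CLAIM (what is proved, stated in full; the proofs are below) =====
def Claim_equal_generate_diagram_text_blank : Prop := ∀ (numq : Int) (tex_diagram_template_txt : String), Dom_generate_diagram_text_blank numq tex_diagram_template_txt → Spec_generate_diagram_text_blank numq tex_diagram_template_txt (generate_diagram_text_blank numq tex_diagram_template_txt)

-- ===== LEMMAS AND PROOFS =====

-- common reference form: the concatenation after n items, with A's per-item branch
def pvG (headtext diagram : String) : Nat → String
  | 0 => ""
  | n + 1 =>
      (if ((n : Int) + 1 > 8 ∧ PySem.Int.mod ((n : Int) + 1) 8 = 1)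
        then pvG headtext diagram n ++ headtext else pvG headtext diagram n) ++ diagram

-- accumulator-free tail of B's loop
def pvTail (numq : Int) (headtext diagram : String) (b : Int) : String :=
  if _h : 8 * b < numq then
    (if b > 0 then headtext else "") ++ pvStrMul diagram (min 8 (numq - 8 * b))
      ++ pvTail numq headtext diagram (b + 1)
  else ""
termination_by (numq - 8 * b).toNat
decreasing_by omega

theorem pvStrMulNat_succ_right (s : String) (n : Nat) :
    pvStrMulNat s (n + 1) = pvStrMulNat s n ++ s := by
  induction n with
  | zero => simp [pvStrMulNat]
  | succ k ih =>
      calc pvStrMulNat s (k + 1 + 1) = s ++ (pvStrMulNat s k ++ s) := by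
            rw [show pvStrMulNat s (k + 1 + 1) = s ++ pvStrMulNat s (k + 1) from rfl, ih]
        _ = (s ++ pvStrMulNat s k) ++ s := by rw [String.append_assoc]
        _ = pvStrMulNat s (k + 1) ++ s := rfl

-- controlled unfoldings of pvTail
theorem pvTail_pos {numq : Int} (h d : String) {b : Int} (hlt : 8 * b < numq) :
    pvTail numq h d b
      = (if b > 0 then h else "") ++ pvStrMul d (min 8 (numq - 8 * b)) ++ pvTail numq h d (b + 1) := by
  rw [pvTail]; simp only [hlt, dif_pos]

theorem pvTail_neg {numq : Int} (h d : String) {b : Int} (hge : ¬ 8 * b < numq) :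
    pvTail numq h d b = "" := by
  rw [pvTail]; exact dif_neg hge

theorem pvIntercalate_nil (l : List (List Char)) : List.intercalate [] l = l.flatten := by
  induction l with
  | nil => simp [List.intercalate]
  | cons a t ih => cases t <;> simp_all [List.intercalate, List.intersperse]

theorem pvJoin_append (l : List String) (x : String) :
    PySem.Str.join "" (l ++ [x]) = PySem.Str.join "" l ++ x := by
  simp [PySem.Str.join, PySem.Chars.join, pvIntercalate_nil]

theorem pvAltLoop_eq_tail (numq : Int) (h d : String) :
    ∀ (b : Int) (pieces : List String),
      PySem.Str.join "" (pvAltLoop numq h d b pieces)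
        = PySem.Str.join "" pieces ++ pvTail numq h d b := by
  intro b pieces
  induction b, pieces using pvAltLoop.induct numq h d with
  | case1 b pieces hlt ih =>
      rw [pvAltLoop]
      simp only [hlt, dif_pos]
      simp only [dite_eq_ite] at ih
      rw [ih, pvTail_pos h d hlt]
      split_ifs with hb
      · rw [pvJoin_append, pvJoin_append]
        simp [String.append_assoc]
      · rw [pvJoin_append]
        simp [String.append_assoc]
  | case2 b pieces hge =>
      rw [pvAltLoop]
      simp only [hge, dif_neg, not_false_iff]
      rw [pvTail_neg h d hge, String.append_empty]

-- one more item extends the block decomposition by A's per-item step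
theorem pvTail_succ (h d : String) (n : Nat) : ∀ (b : Int), 8 * b ≤ (n : Int) → 0 ≤ b →
    pvTail ((n : Int) + 1) h d b
      = pvTail (n : Int) h d b
        ++ ((if ((n : Int) + 1 > 8 ∧ PySem.Int.mod ((n : Int) + 1) 8 = 1) then h else "") ++ d) := by
  intro b
  have hmod : PySem.Int.mod ((n : Int) + 1) 8 = ((n : Int) + 1) % 8 :=
    PySem.Int.mod_eq_emod_of_pos (by norm_num)
  induction b using pvTail.induct (n : Int) with
  | case1 b hlt ih =>
      intro _ hb0
      by_cases hr : 8 * b + 8 ≤ (n : Int)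
      · -- full block of 8 on both sides
        rw [pvTail_pos h d (by omega : 8 * b < (n : Int) + 1), pvTail_pos h d hlt]
        have hmin1 : min (8 : Int) ((n : Int) + 1 - 8 * b) = 8 := by omega
        have hmin2 : min (8 : Int) ((n : Int) - 8 * b) = 8 := by omega
        rw [hmin1, hmin2, ih (by omega) (by omega)]
        simp [String.append_assoc]
      · -- last block: 8*b < n < 8*b+8; it grows by one diagram, no headtext
        rw [pvTail_pos h d (by omega : 8 * b < (n : Int) + 1), pvTail_pos h d hlt]
        rw [pvTail_neg h d (by omega : ¬ 8 * (b + 1) < (n : Int) + 1)]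
        rw [pvTail_neg h d (by omega : ¬ 8 * (b + 1) < (n : Int))]
        have hC : ¬ ((n : Int) + 1 > 8 ∧ PySem.Int.mod ((n : Int) + 1) 8 = 1) := by
          rw [hmod]; omega
        rw [if_neg hC]
        have hmin1 : min (8 : Int) ((n : Int) + 1 - 8 * b) = ((n : Int) - 8 * b) + 1 := by omega
        have hmin2 : min (8 : Int) ((n : Int) - 8 * b) = (n : Int) - 8 * b := by omega
        rw [hmin1, hmin2]
        have hk : (((n : Int) - 8 * b) + 1).toNat = ((n : Int) - 8 * b).toNat + 1 := by omega
        rw [pvStrMul, pvStrMul, hk, pvStrMulNat_succ_right]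
        simp [String.append_assoc]
  | case2 b hge =>
      intro hble hb0
      -- 8*b = n: a fresh one-diagram block starts; headtext iff b > 0 iff n+1 > 8
      rw [pvTail_pos h d (by omega : 8 * b < (n : Int) + 1), pvTail_neg h d hge]
      rw [pvTail_neg h d (by omega : ¬ 8 * (b + 1) < (n : Int) + 1)]
      have hmin : min (8 : Int) ((n : Int) + 1 - 8 * b) = 1 := by omega
      rw [hmin]
      have hC : ((n : Int) + 1 > 8 ∧ PySem.Int.mod ((n : Int) + 1) 8 = 1) ↔ b > 0 := by
        rw [hmod]; omega
      have hone : pvStrMul d 1 = d ++ "" := rfl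
      rw [hone]
      by_cases hb : b > 0
      · rw [if_pos hb, if_pos (hC.mpr hb)]
        simp
      · rw [if_neg hb, if_neg (fun hc => hb (hC.mp hc))]
        simp

theorem pvTail_zero_eq_pvG (h d : String) (n : Nat) :
    pvTail (n : Int) h d 0 = pvG h d n := by
  induction n with
  | zero => rw [pvTail, pvG]; simp
  | succ k ih =>
      have := pvTail_succ h d k 0 (by omega) le_rfl
      push_cast
      push_cast at this ih
      rw [this, ih, pvG]
      split_ifs with hc
      · simp [String.append_assoc]
      · simp

theorem pvFoldA_eq_pvG (t h : String) (n : Nat) :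
    (PySem.List.pyRange 1 ((n : Int) + 1) 1).foldl
      (fun diagrams_text i =>
        let img_tex := make_diagram_blank t
        let diagrams_text :=
          if i > 8 ∧ PySem.Int.mod i 8 = 1 then diagrams_text ++ h else diagrams_text
        diagrams_text ++ img_tex) ""
      = pvG h (make_diagram_blank t) n := by
  induction n with
  | zero =>
      rw [PySem.List.pyRange_one_eq_nil (by norm_num)]
      rfl
  | succ k ih =>
      have hsplit : PySem.List.pyRange 1 (((k : Nat) + 1 : Nat) + 1 : Int) 1
          = PySem.List.pyRange 1 ((k : Int) + 1) 1 ++ [(k : Int) + 1] := by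
        push_cast
        exact PySem.List.pyRange_one_succ_right (by omega)
      push_cast at hsplit ⊢
      rw [hsplit, List.foldl_append, ih, List.foldl_cons, List.foldl_nil, pvG]

theorem generate_diagram_text_blank_spec : Claim_equal_generate_diagram_text_blank := by
  intro numq t _
  unfold Spec_generate_diagram_text_blank generate_diagram_text_blank generate_diagram_text_blank_alt
  rw [pvAltLoop_eq_tail]
  rw [show PySem.Str.join "" ([] : List String) = "" from rfl, String.empty_append]
  by_cases hpos : 0 < numq
  · have hn : ((numq.toNat : Int)) = numq := Int.toNat_of_nonneg (by omega)
    rw [← hn, pvTail_zero_eq_pvG, pvFoldA_eq_pvG]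
  · rw [PySem.List.pyRange_one_eq_nil (by omega), List.foldl_nil]
    rw [pvTail_neg _ _ (by omega : ¬ 8 * (0:Int) < numq)]
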